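-- pv_equiv track=rewrite | github.com/Arsen1302/Code-copy-detector | TestData/solutions/problem_850_2.py | solution_850_2
-- ===== SOURCE A (Python) =====
-- def solution_850_2(s: str, maxLetters: int, minSize: int, maxSize: int) -> int:
--     freq = {}
--     temp = {}
--     for i in range(len(s)):
--         temp[s[i]] =  1 + temp.get(s[i], 0)
--         if i >= minSize:
--             temp[s[i-minSize]] -= 1
--             if temp[s[i-minSize]] == 0: temp.pop(s[i-minSize])
--
--         if i >= minSize-1 and len(temp) <= maxLetters:
--             key = s[i-minSize+1: i+1]
--             freq[key] = 1 + freq.get(key, 0)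
--     return max(freq.values(), default=0)
-- ===== SOURCE B (Python) =====
-- def solution_850_2(s: str, maxLetters: int, minSize: int, maxSize: int) -> int:
--     freq = {}
--     for end in range(max(minSize - 1, 0), len(s)):
--         sub = s[end - minSize + 1: end + 1]
--         if len(set(sub)) <= maxLetters:
--             freq[sub] = freq.get(sub, 0) + 1
--     return max(freq.values(), default=0)
-- ===== Notes on version B (the rewrite author's own statement) =====
-- stated objective: idiomatic
-- what changed: B drops A's incrementally maintained rolling character-frequency dict and instead, for each window end, extracts the substring and recomputes its distinct-letter count with set(), counting qualifying substrings in one plain dict and taking max(..., default=0).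
import Mathlib
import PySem

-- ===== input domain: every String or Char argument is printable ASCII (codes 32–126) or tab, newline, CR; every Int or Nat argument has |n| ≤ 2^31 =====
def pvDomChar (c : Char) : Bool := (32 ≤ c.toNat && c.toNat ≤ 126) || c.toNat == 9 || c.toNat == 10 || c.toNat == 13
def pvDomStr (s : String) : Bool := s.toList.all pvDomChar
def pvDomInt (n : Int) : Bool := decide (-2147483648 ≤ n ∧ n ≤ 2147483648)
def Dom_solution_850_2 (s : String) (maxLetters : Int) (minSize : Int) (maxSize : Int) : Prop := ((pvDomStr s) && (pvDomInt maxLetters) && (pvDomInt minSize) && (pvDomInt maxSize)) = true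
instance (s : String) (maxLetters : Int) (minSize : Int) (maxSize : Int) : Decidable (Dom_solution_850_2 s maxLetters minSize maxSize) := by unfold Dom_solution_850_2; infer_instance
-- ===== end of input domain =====

-- B replaces A's incrementally maintained rolling character-frequency dict with a fresh per-window
-- substring extraction and distinct-letter recount via set() (idiomatic; same asymptotic cost).

-- ===== PORT A =====
-- one iteration of A's loop body; state = (freq, temp).
-- 'temp[s[i-minSize]] -= 1' (plain indexing, KeyError if absent) is ported as getD 0: on Pre_ the key is always present there, so this is exact.
def stepA850 (cs : List Char) (maxLetters minSize : Int)
    (st : PySem.Dict (List Char) Int × PySem.Dict Char Int) (i : Int) :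
    PySem.Dict (List Char) Int × PySem.Dict Char Int :=
  let freq := st.1
  let temp := st.2
  let ci := PySem.List.pyGetD cs i ' '
  let temp := temp.insert ci (1 + temp.getD ci 0)
  let temp :=
    if minSize ≤ i then
      let cj := PySem.List.pyGetD cs (i - minSize) ' '
      let temp2 := temp.insert cj (temp.getD cj 0 - 1)
      if temp2.getD cj 0 = 0 then temp2.erase cj else temp2
    else temp
  if minSize - 1 ≤ i ∧ (temp.size : Int) ≤ maxLetters then
    let key := PySem.List.slice cs (some (i - minSize + 1)) (some (i + 1))
    (freq.insert key (1 + freq.getD key 0), temp)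
  else (freq, temp)

def solution_850_2 (s : String) (maxLetters : Int) (minSize : Int) (maxSize : Int) : Int :=
  let cs := s.toList
  let st := (PySem.List.pyRange 0 (cs.length : Int) 1).foldl
    (stepA850 cs maxLetters minSize) (PySem.Dict.empty, PySem.Dict.empty)
  ((PySem.List.max? st.1.values (fun v => v)).getD 0)

-- ===== PORT B =====
-- one iteration of B's loop body (i is the window end index).
def stepB850 (cs : List Char) (maxLetters minSize : Int)
    (freq : PySem.Dict (List Char) Int) (i : Int) : PySem.Dict (List Char) Int :=
  let sub := PySem.List.slice cs (some (i - minSize + 1)) (some (i + 1))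
  if PySem.Set.len (PySem.Set.ofList sub) ≤ maxLetters then
    freq.insert sub (freq.getD sub 0 + 1)
  else freq

def solution_850_2_alt (s : String) (maxLetters : Int) (minSize : Int) (maxSize : Int) : Int :=
  let cs := s.toList
  let freq := (PySem.List.pyRange (max (minSize - 1) 0) (cs.length : Int) 1).foldl
    (stepB850 cs maxLetters minSize) PySem.Dict.empty
  ((PySem.List.max? freq.values (fun v => v)).getD 0)

-- ===== PRECONDITION & SPEC =====
-- Pre_ excludes exactly the inputs where A raises: for minSize < 0 on a nonempty string,
-- A's 'temp[s[i-minSize]] -= 1' always hits a KeyError or IndexError, so A never returns there.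
def Pre_solution_850_2 (s : String) (maxLetters : Int) (minSize : Int) (maxSize : Int) : Prop :=
  0 ≤ minSize ∨ s = ""
instance (s : String) (maxLetters : Int) (minSize : Int) (maxSize : Int) : Decidable (Pre_solution_850_2 s maxLetters minSize maxSize) := by unfold Pre_solution_850_2; infer_instance

def pvWitness_solution_850_2 : String × Int × Int × Int := ("aabcabc", 2, 3, 4)

def Spec_solution_850_2 (s : String) (maxLetters : Int) (minSize : Int) (maxSize : Int) (out : Int) : Prop := out = solution_850_2_alt s maxLetters minSize maxSize
instance (s : String) (maxLetters : Int) (minSize : Int) (maxSize : Int) (out : Int) : Decidable (Spec_solution_850_2 s maxLetters minSize maxSize out) := by unfold Spec_solution_850_2; infer_instance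

-- ===== CLAIM (what is proved, stated in full; the proofs are below) =====
def Claim_equal_solution_850_2 : Prop := ∀ (s : String) (maxLetters : Int) (minSize : Int) (maxSize : Int), Dom_solution_850_2 s maxLetters minSize maxSize → Pre_solution_850_2 s maxLetters minSize maxSize → Spec_solution_850_2 s maxLetters minSize maxSize (solution_850_2 s maxLetters minSize maxSize)

-- ===== LEMMAS AND PROOFS =====

-- Dict.erase lemmas (none are provided by the PySem lemma list)
theorem pv_find?_filter_ne {ν : Type} (l : List (Char × ν)) (k k' : Char) (h : k' ≠ k) :
    (l.filter (fun p => !(p.1 == k))).find? (fun p => p.1 == k') = l.find? (fun p => p.1 == k') := by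
  induction l with
  | nil => rfl
  | cons p t ih =>
    by_cases hpk : p.1 = k
    · rw [List.filter_cons_of_neg (by simp [hpk]),
        List.find?_cons_of_neg (by simp [hpk]; exact fun hh => h hh.symm), ih]
    · rw [List.filter_cons_of_pos (by simp [hpk])]
      by_cases hpk' : p.1 = k'
      · rw [List.find?_cons_of_pos (by simp [hpk']), List.find?_cons_of_pos (by simp [hpk'])]
      · rw [List.find?_cons_of_neg (by simp [hpk']), List.find?_cons_of_neg (by simp [hpk']), ih]

theorem pv_getD_erase {ν : Type} (d : PySem.Dict Char ν) (k k' : Char) (d0 : ν) :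
    (d.erase k).getD k' d0 = if k' = k then d0 else d.getD k' d0 := by
  by_cases h : k' = k
  · subst h
    simp only [PySem.Dict.getD, PySem.Dict.get?, PySem.Dict.erase, if_pos rfl]
    have hnone : (d.items.filter (fun p => !(p.1 == k'))).find? (fun p => p.1 == k') = none := by
      apply List.find?_eq_none.mpr
      intro p hp
      have := List.of_mem_filter hp
      simpa using this
    simp [hnone]
  · simp only [PySem.Dict.getD, PySem.Dict.get?, PySem.Dict.erase, if_neg h]
    rw [pv_find?_filter_ne _ _ _ h]

theorem pv_keys_erase {ν : Type} (d : PySem.Dict Char ν) (k : Char) :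
    (d.erase k).keys = d.keys.filter (fun c => !(c == k)) := by
  show (d.items.filter (fun p => !(p.1 == k))).map Prod.fst
      = (d.items.map Prod.fst).filter (fun c => !(c == k))
  induction d.items with
  | nil => rfl
  | cons p t ih =>
    by_cases hpk : p.1 = k
    · simp only [List.filter_cons, List.map_cons]
      simp [hpk, ih]
    · simp only [List.filter_cons, List.map_cons]
      have h1 : (p.1 == k) = false := by simp [hpk]
      simp [h1, ih]

theorem pv_snd_if {α β : Type} (c : Prop) [Decidable c] (x y : α) (t : β) :
    (if c then (x, t) else (y, t)).2 = t := by split <;> rfl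

theorem pv_fst_if {α β : Type} (c : Prop) [Decidable c] (x y : α) (t : β) :
    (if c then (x, t) else (y, t)).1 = if c then x else y := by split <;> rfl

-- 'temp represents the multiset of characters of w'
def Repr850 (t : PySem.Dict Char Int) (w : List Char) : Prop :=
  (∀ c, t.getD c 0 = (w.count c : Int)) ∧ (∀ c, c ∈ t.keys ↔ c ∈ w) ∧ t.keys.Nodup

theorem repr850_empty : Repr850 PySem.Dict.empty [] := by
  refine ⟨fun c => ?_, fun c => ?_, ?_⟩ <;> simp [PySem.Dict.getD_empty, PySem.Dict.keys_empty]

theorem repr850_add (t : PySem.Dict Char Int) (w : List Char) (c : Char) (h : Repr850 t w) :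
    Repr850 (t.insert c (1 + t.getD c 0)) (w ++ [c]) := by
  obtain ⟨hv, hm, hnd⟩ := h
  refine ⟨fun c' => ?_, fun c' => ?_, PySem.Dict.nodup_keys_insert _ _ _ hnd⟩
  · rw [PySem.Dict.getD_insert]
    by_cases hc : c' = c
    · subst hc
      rw [if_pos rfl, hv, List.count_append]
      simp; ring
    · have hcc : c ≠ c' := fun hh => hc hh.symm
      rw [if_neg hc, hv c', List.count_append]
      simp [List.count_singleton, hcc]
  · rw [PySem.Dict.mem_keys_insert]
    by_cases hc : c' = c <;> simp [hc, hm]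

theorem repr850_sub (t : PySem.Dict Char Int) (w : List Char) (c : Char)
    (h : Repr850 t (c :: w)) :
    Repr850 (if (t.insert c (t.getD c 0 - 1)).getD c 0 = 0
             then (t.insert c (t.getD c 0 - 1)).erase c
             else t.insert c (t.getD c 0 - 1)) w := by
  obtain ⟨hv, hm, hnd⟩ := h
  have hval : t.getD c 0 - 1 = (w.count c : Int) := by
    have h1 := hv c
    rw [List.count_cons] at h1
    simp at h1
    omega
  have hget2 : ∀ c', (t.insert c (t.getD c 0 - 1)).getD c' 0
      = if c' = c then (w.count c : Int) else (w.count c' : Int) := by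
    intro c'
    rw [PySem.Dict.getD_insert]
    by_cases hc : c' = c
    · simp [hc, hval]
    · have hcc : c ≠ c' := fun hh => hc hh.symm
      rw [if_neg hc, if_neg hc, hv c', List.count_cons]
      simp [hcc]
  have hnd2 : (t.insert c (t.getD c 0 - 1)).keys.Nodup := PySem.Dict.nodup_keys_insert _ _ _ hnd
  have hm2 : ∀ c', c' ∈ (t.insert c (t.getD c 0 - 1)).keys ↔ (c' = c ∨ c' ∈ w) := by
    intro c'
    rw [PySem.Dict.mem_keys_insert, hm]
    simp [List.mem_cons]
  by_cases hz : (t.insert c (t.getD c 0 - 1)).getD c 0 = 0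
  · rw [if_pos hz]
    have hcw : w.count c = 0 := by
      have h1 := hget2 c
      rw [if_pos rfl] at h1
      rw [h1] at hz
      exact_mod_cast hz
    have hcnot : c ∉ w := by rwa [← List.count_eq_zero]
    refine ⟨fun c' => ?_, fun c' => ?_, ?_⟩
    · rw [pv_getD_erase]
      by_cases hc : c' = c
      · simp [hc, hcw]
      · rw [if_neg hc, hget2, if_neg hc]
    · rw [pv_keys_erase, List.mem_filter]
      constructor
      · rintro ⟨hmem, hne⟩
        rcases (hm2 c').mp hmem with h1 | h1
        · simp [h1] at hne
        · exact h1
      · intro hw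
        have hne : c' ≠ c := fun hh => hcnot (hh ▸ hw)
        exact ⟨(hm2 c').mpr (Or.inr hw), by simp [hne]⟩
    · rw [pv_keys_erase]; exact hnd2.filter _
  · rw [if_neg hz]
    have hcw : w.count c ≠ 0 := by
      have h1 := hget2 c
      rw [if_pos rfl] at h1
      rw [h1] at hz
      exact_mod_cast hz
    have hcin : c ∈ w := by
      rw [← List.count_pos_iff]
      omega
    refine ⟨fun c' => ?_, fun c' => ?_, hnd2⟩
    · rw [hget2]
      by_cases hc : c' = c <;> simp [hc]
    · rw [hm2]
      constructor
      · rintro (h1 | h1)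
        · exact h1 ▸ hcin
        · exact h1
      · exact Or.inr

theorem repr850_size (t : PySem.Dict Char Int) (w : List Char) (h : Repr850 t w) :
    (t.size : Int) = PySem.Set.len (PySem.Set.ofList w) := by
  obtain ⟨_, hm, hnd⟩ := h
  have hperm : t.keys.Perm (PySem.Set.ofList w) := by
    rw [List.perm_ext_iff_of_nodup hnd (PySem.Set.nodup_ofList w)]
    intro a; rw [hm, PySem.Set.mem_ofList]
  have hlen : t.keys.length = (PySem.Set.ofList w).length := hperm.length_eq
  have hsize : t.size = t.keys.length := by
    simp [PySem.Dict.size, PySem.Dict.keys]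
  simp [PySem.Set.len, hsize, hlen]

-- the window of (at most) the last m characters of the length-k prefix
def win850 (cs : List Char) (m k : Nat) : List Char := (cs.take k).drop (k - m)

theorem win850_slice (cs : List Char) (m k : Nat) (hmk : m ≤ k + 1) :
    PySem.List.slice cs (some ((k : Int) - (m : Int) + 1)) (some ((k : Int) + 1))
      = win850 cs m (k + 1) := by
  have h0 : (0 : Int) ≤ (k : Int) - (m : Int) + 1 := by omega
  rw [PySem.List.slice_toNat cs h0 (by omega)]
  have h1 : ((k : Int) - (m : Int) + 1).toNat = k + 1 - m := by omega
  have h2 : ((k : Int) + 1).toNat = k + 1 := by omega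
  rw [h1, h2, win850, List.drop_take]

theorem win850_append (cs : List Char) (m k : Nat) (hk : k < cs.length) :
    (cs.take (k + 1)).drop (k - m) = win850 cs m k ++ [cs[k]] := by
  have htake : cs.take (k + 1) = cs.take k ++ [cs[k]] := by
    rw [List.take_add_one]
    simp [List.getElem?_eq_getElem hk]
  rw [htake, List.drop_append_of_le_length (by simp; omega), win850]

theorem win850_cons (cs : List Char) (m k : Nat) (hk : k < cs.length) (hmk : m ≤ k) :
    (cs.take (k + 1)).drop (k - m) = cs[k - m] :: win850 cs m (k + 1) := by
  have hlt : k - m < (cs.take (k + 1)).length := by simp; omega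
  rw [List.drop_eq_getElem_cons hlt, List.getElem_take, win850]
  have : k - m + 1 = k + 1 - m := by omega
  rw [this]

-- A's step updates temp to represent the new window, and updates freq exactly as B's step does
theorem stepA850_spec (cs : List Char) (maxLetters : Int) (m k : Nat) (hk : k < cs.length)
    (st : PySem.Dict (List Char) Int × PySem.Dict Char Int)
    (hr : Repr850 st.2 (win850 cs m k)) :
    Repr850 (stepA850 cs maxLetters (m : Int) st (k : Int)).2 (win850 cs m (k + 1)) ∧
    (stepA850 cs maxLetters (m : Int) st (k : Int)).1 =
      (if ((m : Int) - 1 ≤ (k : Int) ∧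
            PySem.Set.len (PySem.Set.ofList (win850 cs m (k + 1))) ≤ maxLetters)
       then st.1.insert (win850 cs m (k + 1)) (st.1.getD (win850 cs m (k + 1)) 0 + 1)
       else st.1) := by
  have hci : PySem.List.pyGetD cs (k : Int) ' ' = cs[k] := by
    rw [PySem.List.pyGetD_natCast, List.getD_eq_getElem cs ' ' hk]
  by_cases hmk : m ≤ k
  · -- the sliding case: add cs[k], then remove cs[k-m]
    have hmi : ((m : Int) ≤ (k : Int)) := by omega
    have hcj : PySem.List.pyGetD cs ((k : Int) - (m : Int)) ' ' = cs[k - m] := by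
      have hh : (k : Int) - (m : Int) = ((k - m : Nat) : Int) := by omega
      rw [hh, PySem.List.pyGetD_natCast, List.getD_eq_getElem cs ' ' (by omega)]
    have hadd : Repr850 (st.2.insert cs[k] (1 + st.2.getD cs[k] 0))
        (cs[k - m] :: win850 cs m (k + 1)) := by
      rw [← win850_cons cs m k hk hmk, win850_append cs m k hk]
      exact repr850_add _ _ _ hr
    have hsub := repr850_sub _ _ _ hadd
    have hrep : Repr850 (stepA850 cs maxLetters (m : Int) st (k : Int)).2
        (win850 cs m (k + 1)) := by
      simp only [stepA850, hci, hcj, if_pos hmi, pv_snd_if]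
      exact hsub
    refine ⟨hrep, ?_⟩
    have hsize := repr850_size _ _ hrep
    have hkey := win850_slice cs m k (by omega)
    simp only [stepA850, hci, hcj, if_pos hmi, pv_snd_if, pv_fst_if] at hsize ⊢
    rw [hkey, hsize, Int.add_comm 1 (st.1.getD (win850 cs m (k + 1)) 0)]
  · -- the growing case (k < m): only the add happens
    have hmi : ¬ ((m : Int) ≤ (k : Int)) := by omega
    have hw1 : win850 cs m (k + 1) = win850 cs m k ++ [cs[k]] := by
      have h1 : k + 1 - m = 0 := by omega
      have h2 : k - m = 0 := by omega
      rw [win850, h1, ← h2, win850_append cs m k hk]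
    have hadd : Repr850 (st.2.insert cs[k] (1 + st.2.getD cs[k] 0)) (win850 cs m (k + 1)) := by
      rw [hw1]; exact repr850_add _ _ _ hr
    have hrep : Repr850 (stepA850 cs maxLetters (m : Int) st (k : Int)).2
        (win850 cs m (k + 1)) := by
      simp only [stepA850, hci, if_neg hmi, pv_snd_if]
      exact hadd
    refine ⟨hrep, ?_⟩
    have hsize := repr850_size _ _ hrep
    simp only [stepA850, hci, if_neg hmi, pv_snd_if, pv_fst_if] at hsize ⊢
    by_cases hmk1 : (m : Int) - 1 ≤ (k : Int)
    · -- k = m - 1: the first full window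
      have hkey := win850_slice cs m k (by omega)
      rw [hkey, hsize, Int.add_comm 1 (st.1.getD (win850 cs m (k + 1)) 0)]
    · rw [if_neg (by tauto), if_neg (by tauto)]

-- main loop invariant: after processing indices 0..k-1, A's temp represents the current
-- window and A's freq equals B's fold over its range cut at k
theorem inv850 (cs : List Char) (maxLetters : Int) (m : Nat) (k : Nat) (hk : k ≤ cs.length) :
    Repr850 ((PySem.List.pyRange 0 (k : Int) 1).foldl
        (stepA850 cs maxLetters (m : Int)) (PySem.Dict.empty, PySem.Dict.empty)).2
      (win850 cs m k) ∧
    ((PySem.List.pyRange 0 (k : Int) 1).foldl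
        (stepA850 cs maxLetters (m : Int)) (PySem.Dict.empty, PySem.Dict.empty)).1
      = (PySem.List.pyRange (max ((m : Int) - 1) 0) (k : Int) 1).foldl
          (stepB850 cs maxLetters (m : Int)) PySem.Dict.empty := by
  induction k with
  | zero =>
    simp only [Nat.cast_zero]
    rw [PySem.List.pyRange_one_eq_nil (le_refl 0), PySem.List.pyRange_one_eq_nil (le_max_right _ _)]
    have hw0 : win850 cs m 0 = [] := by simp [win850]
    rw [hw0]
    exact ⟨repr850_empty, rfl⟩
  | succ k ih =>
    obtain ⟨ihr, ihf⟩ := ih (by omega)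
    have hkl : k < cs.length := by omega
    have hcast : ((k + 1 : Nat) : Int) = (k : Int) + 1 := by push_cast; ring
    have hfoldA : (PySem.List.pyRange 0 ((k + 1 : Nat) : Int) 1).foldl
        (stepA850 cs maxLetters (m : Int)) (PySem.Dict.empty, PySem.Dict.empty)
        = stepA850 cs maxLetters (m : Int)
            ((PySem.List.pyRange 0 (k : Int) 1).foldl
              (stepA850 cs maxLetters (m : Int)) (PySem.Dict.empty, PySem.Dict.empty)) (k : Int) := by
      rw [hcast, PySem.List.pyRange_one_succ_right (by omega), List.foldl_append]
      rfl
    obtain ⟨hrep, hfr⟩ := stepA850_spec cs maxLetters m k hkl _ ihr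
    refine ⟨by rw [hfoldA]; exact hrep, ?_⟩
    rw [hfoldA, hfr, ihf]
    by_cases hge : max ((m : Int) - 1) 0 ≤ (k : Int)
    · rw [hcast, PySem.List.pyRange_one_succ_right hge, List.foldl_append]
      have hm1 : (m : Int) - 1 ≤ (k : Int) := le_trans (le_max_left _ _) hge
      show _ = stepB850 cs maxLetters (m : Int) _ (k : Int)
      rw [stepB850, win850_slice cs m k (by omega)]
      by_cases hcond : PySem.Set.len (PySem.Set.ofList (win850 cs m (k + 1))) ≤ maxLetters
      · rw [if_pos ⟨hm1, hcond⟩, if_pos hcond]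
      · rw [if_neg (by tauto), if_neg hcond]
    · have hm1 : ¬ ((m : Int) - 1 ≤ (k : Int)) := by
        intro h; exact hge (max_le h (by omega))
      rw [if_neg (by tauto)]
      rw [PySem.List.pyRange_one_eq_nil (by omega), PySem.List.pyRange_one_eq_nil (by omega)]

-- ===== VERDICT (by name: the statement is the Claim_ definition above) =====
theorem solution_850_2_spec : Claim_equal_solution_850_2 := by
  intro s maxLetters minSize maxSize _ hpre
  unfold Spec_solution_850_2
  by_cases hms : 0 ≤ minSize
  · obtain ⟨m, hm⟩ : ∃ m : Nat, (m : Int) = minSize := ⟨minSize.toNat, Int.toNat_of_nonneg hms⟩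
    have h2 := (inv850 s.toList maxLetters m s.toList.length le_rfl).2
    rw [hm] at h2
    exact congrArg (fun d => ((PySem.List.max? (PySem.Dict.values d) (fun v => v)).getD 0)) h2
  · have hs : s = "" := hpre.resolve_left hms
    subst hs
    unfold solution_850_2 solution_850_2_alt
    have h0 : ("" : String).toList = ([] : List Char) := rfl
    simp only [h0, List.length_nil, Nat.cast_zero,
      PySem.List.pyRange_one_eq_nil (le_refl (0 : Int)),
      PySem.List.pyRange_one_eq_nil (le_max_right (minSize - 1) (0 : Int)),
      List.foldl_nil]
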